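-- pv_equiv track=rewrite | github.com/SE-starshippilot/CSC1001 | Assignment 2/q2-6.py | get_allowed
-- ===== SOURCE A (Python) =====
-- def get_allowed(size, prev_queens, current_line):
--     positions = [True] * size
--     for i in range(size):
--         if i in prev_queens:
--             positions[i] = False
--             continue
--         for j in range(len(prev_queens)):
--             if abs(i - prev_queens[j]) == current_line - j:
--                 positions[i] = False
--                 break
--     return [i for i in range(len(positions)) if positions[i]]
-- ===== SOURCE B (Python) =====
-- def get_allowed(size, prev_queens, current_line):
--     forbidden = set(prev_queens)
--     d = current_line
--     for r in prev_queens: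
--         if d > 0:
--             forbidden.add(r + d)
--             forbidden.add(r - d)
--         d -= 1
--     return [i for i in range(size) if i not in forbidden]
-- ===== Notes on version B (the rewrite author's own statement) =====
-- stated objective: faster
-- what changed: Instead of testing every candidate row against every placed queen (nested loops), B marks the forbidden rows (queen rows plus the two diagonal hits r±d for positive column distance d) in one pass over the queens into a hash set, then filters range(size) with O(1) membership tests.
import Mathlib
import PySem

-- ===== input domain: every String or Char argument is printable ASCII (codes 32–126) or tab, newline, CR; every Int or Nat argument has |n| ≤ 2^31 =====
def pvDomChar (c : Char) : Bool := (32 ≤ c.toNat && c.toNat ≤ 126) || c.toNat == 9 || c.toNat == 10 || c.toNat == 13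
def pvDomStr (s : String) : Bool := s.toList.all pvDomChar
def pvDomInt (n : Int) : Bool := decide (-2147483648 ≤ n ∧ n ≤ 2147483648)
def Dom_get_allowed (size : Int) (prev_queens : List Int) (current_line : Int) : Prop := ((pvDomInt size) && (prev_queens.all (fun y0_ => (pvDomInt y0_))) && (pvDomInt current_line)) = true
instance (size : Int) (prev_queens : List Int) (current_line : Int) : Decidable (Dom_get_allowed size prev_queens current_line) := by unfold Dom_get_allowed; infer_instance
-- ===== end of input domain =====

-- B replaces A's per-candidate scan over all queens with a single marking pass into a set
-- followed by one filtering pass (objective: faster, O(size+queens) vs O(size*queens)).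

-- ===== PORT A =====
-- inner 'for j in range(len(prev_queens)): if abs(i - prev_queens[j]) == current_line - j: …break'
-- carried as a recursion over the queens list with d = current_line - j decreasing by 1 each step
def innerLoop (i : Int) : Int → List Int → Bool
  | _, [] => false
  | d, r :: rest => if |i - r| = d then true else innerLoop i (d - 1) rest

def get_allowed (size : Int) (prev_queens : List Int) (current_line : Int) : List Int :=
  let positions :=
    (PySem.List.pyRange 0 size 1).foldl
      (fun pos i =>
        if prev_queens.contains i then PySem.List.pySetD pos i false
        else if innerLoop i current_line prev_queens then PySem.List.pySetD pos i false
        else pos)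
      (List.replicate size.toNat true)
  (PySem.List.pyRange 0 (positions.length : Int) 1).filter
    (fun i => PySem.List.pyGetD positions i false)

-- ===== PORT B =====
-- 'for r in prev_queens: if d > 0: forbidden.add(r+d); forbidden.add(r-d); d -= 1'
def markLoop : Int → List Int → PySem.Set Int → PySem.Set Int
  | _, [], s => s
  | d, r :: rest, s =>
      markLoop (d - 1) rest
        (if 0 < d then PySem.Set.add (PySem.Set.add s (r + d)) (r - d) else s)

def get_allowed_alt (size : Int) (prev_queens : List Int) (current_line : Int) : List Int :=
  let forbidden := markLoop current_line prev_queens (PySem.Set.ofList prev_queens)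
  (PySem.List.pyRange 0 size 1).filter (fun i => !(PySem.Set.contains forbidden i))

-- ===== PRECONDITION & SPEC =====
def Spec_get_allowed (size : Int) (prev_queens : List Int) (current_line : Int) (out : List Int) : Prop := out = get_allowed_alt size prev_queens current_line
instance (size : Int) (prev_queens : List Int) (current_line : Int) (out : List Int) : Decidable (Spec_get_allowed size prev_queens current_line out) := by unfold Spec_get_allowed; infer_instance

-- ===== CLAIM (what is proved, stated in full; the proofs are below) =====
def Claim_equal_get_allowed : Prop := ∀ (size : Int) (prev_queens : List Int) (current_line : Int), Dom_get_allowed size prev_queens current_line → Spec_get_allowed size prev_queens current_line (get_allowed size prev_queens current_line)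

-- ===== LEMMAS AND PROOFS =====

-- 'some queen r at distance d, d-1, … hits i on a strict diagonal (positive distance)'
def Hit (i : Int) : Int → List Int → Prop
  | _, [] => False
  | d, r :: rest => (0 < d ∧ (i = r + d ∨ i = r - d)) ∨ Hit i (d - 1) rest

-- 'some queen at distance exactly 0 sits on row i itself'
def ZHit (i : Int) : Int → List Int → Prop
  | _, [] => False
  | d, r :: rest => (d = 0 ∧ i = r) ∨ ZHit i (d - 1) rest

theorem ZHit_mem (i : Int) : ∀ (qs : List Int) (d : Int), ZHit i d qs → i ∈ qs := by
  intro qs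
  induction qs with
  | nil => intro d h; exact h.elim
  | cons r rest ih =>
      intro d h
      rw [ZHit] at h
      rcases h with ⟨_, rfl⟩ | h
      · exact List.mem_cons_self
      · exact List.mem_cons_of_mem _ (ih _ h)

-- membership in B's forbidden set
theorem mem_markLoop (i : Int) : ∀ (qs : List Int) (d : Int) (s : PySem.Set Int),
    i ∈ markLoop d qs s ↔ i ∈ s ∨ Hit i d qs := by
  intro qs
  induction qs with
  | nil => intro d s; simp [markLoop, Hit]
  | cons r rest ih =>
      intro d s
      rw [markLoop, ih]
      by_cases hd : 0 < d
      · simp [hd, PySem.Set.mem_add, Hit]; tauto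
      · simp [hd, Hit]

-- A's inner loop succeeds iff a strict-diagonal hit or a zero-distance hit on a queen's own row
theorem innerLoop_iff (i : Int) : ∀ (qs : List Int) (d : Int),
    innerLoop i d qs = true ↔ Hit i d qs ∨ ZHit i d qs := by
  intro qs
  induction qs with
  | nil => intro d; simp [innerLoop, Hit, ZHit]
  | cons r rest ih =>
      intro d
      rw [innerLoop]
      by_cases h : |i - r| = d
      · rw [if_pos h]
        have hd : 0 ≤ d := h ▸ abs_nonneg _
        simp only [true_iff]
        rcases lt_or_eq_of_le hd with hd' | hd'
        · left
          rw [Hit]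
          rcases (abs_eq hd).mp h with h1 | h1
          · exact Or.inl ⟨hd', Or.inl (by omega)⟩
          · exact Or.inl ⟨hd', Or.inr (by omega)⟩
        · right
          rw [ZHit]
          have := (abs_eq hd).mp h
          exact Or.inl ⟨hd'.symm, by omega⟩
      · rw [if_neg h, ih, Hit, ZHit]
        constructor
        · rintro (hh | hz)
          · exact Or.inl (Or.inr hh)
          · exact Or.inr (Or.inr hz)
        · rintro ((⟨hd, hc⟩ | hh) | ⟨hd, rfl⟩ | hz)
          · exact absurd (by rw [abs_eq (le_of_lt hd)]; omega) h
          · exact Or.inl hh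
          · exact absurd (by rw [hd]; simp) h
          · exact Or.inr hz

-- per-candidate agreement: A's blocking test = B's set membership
theorem blocked_eq (prev_queens : List Int) (current_line i : Int) :
    (prev_queens.contains i || innerLoop i current_line prev_queens)
      = PySem.Set.contains (markLoop current_line prev_queens (PySem.Set.ofList prev_queens)) i := by
  rw [Bool.eq_iff_iff, Bool.or_eq_true, List.contains_iff_mem, innerLoop_iff,
    PySem.Set.contains_iff, mem_markLoop, PySem.Set.mem_ofList]
  constructor
  · rintro (hm | hh | hz)
    · exact Or.inl hm
    · exact Or.inr hh
    · exact Or.inl (ZHit_mem _ _ _ hz)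
  · rintro (hm | hh)
    · exact Or.inl hm
    · exact Or.inr (Or.inl hh)

-- the per-step function of A's outer loop, as a single test
theorem step_eq (prev_queens : List Int) (current_line : Int) (pos : List Bool) (i : Int) :
    (if prev_queens.contains i then PySem.List.pySetD pos i false
     else if innerLoop i current_line prev_queens then PySem.List.pySetD pos i false
     else pos)
      = (if (prev_queens.contains i || innerLoop i current_line prev_queens) = true
          then PySem.List.pySetD pos i false else pos) := by
  by_cases h : i ∈ prev_queens
  · simp [h]
  · simp [h]

-- A's outer loop, characterised: after processing rows 0..n-1 the flag at k is the blocking test for k < n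
theorem fold_positions (prev_queens : List Int) (current_line : Int) (N : Nat) :
    ∀ (n : Nat), n ≤ N →
    ((PySem.List.pyRange 0 (n : Int) 1).foldl
      (fun pos i =>
        if prev_queens.contains i then PySem.List.pySetD pos i false
        else if innerLoop i current_line prev_queens then PySem.List.pySetD pos i false
        else pos)
      (List.replicate N true))
      = (List.range N).map (fun k =>
          if k < n then !(prev_queens.contains (k : Int) || innerLoop (k : Int) current_line prev_queens)
          else true) := by
  intro n
  induction n with
  | zero =>
      intro _
      rw [show ((0:Nat):Int) = 0 from rfl, PySem.List.pyRange_one_eq_nil le_rfl, List.foldl_nil]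
      apply List.ext_getElem
      · simp
      · intro k hk1 hk2; simp
  | succ n ih =>
      intro hn
      have hle : n ≤ N := Nat.le_of_succ_le hn
      have hcast : ((n + 1 : Nat) : Int) = (n : Int) + 1 := by push_cast; ring
      rw [hcast, PySem.List.pyRange_one_succ_right (by positivity), List.foldl_append, ih hle]
      simp only [List.foldl_cons, List.foldl_nil]
      rw [step_eq]
      by_cases hb : (prev_queens.contains (n : Int) || innerLoop (n : Int) current_line prev_queens) = true
      · rw [if_pos hb, PySem.List.pySetD_of_nonneg _ _ (Int.natCast_nonneg n)]
        apply List.ext_getElem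
        · simp
        · intro k hk1 hk2
          simp only [List.length_set, List.length_map, List.length_range] at hk1
          rw [List.getElem_set]
          by_cases hkn : (n : Int).toNat = k
          · have hkn' : k = n := by omega
            subst hkn'
            rw [if_pos hkn, List.getElem_map, List.getElem_range, if_pos (Nat.lt_succ_self k), hb]
            rfl
          · have hkn' : k ≠ n := by omega
            simp only [if_neg hkn, List.getElem_map, List.getElem_range]
            by_cases hlt : k < n
            · simp [hlt, Nat.lt_succ_of_lt hlt]
            · have hns : ¬ k < n + 1 := by omega
              simp [hlt, hns]
      · rw [if_neg hb]
        rw [Bool.not_eq_true] at hb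
        apply List.ext_getElem
        · simp
        · intro k hk1 hk2
          simp only [List.getElem_map, List.getElem_range]
          by_cases hlt : k < n
          · simp [hlt, Nat.lt_succ_of_lt hlt]
          · by_cases hkn : k = n
            · subst hkn
              simp only [if_neg hlt, if_pos (Nat.lt_succ_self k), hb, Bool.not_false]
            · have hns : ¬ k < n + 1 := by omega
              simp [hlt, hns]

-- ===== VERDICT (by name: the statement is the Claim_ definition above) =====
theorem get_allowed_spec : Claim_equal_get_allowed := by
  intro size prev_queens current_line _
  unfold Spec_get_allowed get_allowed get_allowed_alt
  set N := size.toNat with hN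
  have hrange : PySem.List.pyRange 0 size 1 = PySem.List.pyRange 0 (N : Int) 1 := by
    by_cases hs : 0 ≤ size
    · rw [hN, Int.toNat_of_nonneg hs]
    · rw [PySem.List.pyRange_one_eq_nil (by omega), PySem.List.pyRange_one_eq_nil (by omega)]
  rw [hrange, fold_positions prev_queens current_line N N (le_refl N)]
  simp only [List.length_map, List.length_range]
  apply List.filter_congr
  intro i hi
  rw [PySem.List.mem_pyRange_one] at hi
  have h0 : 0 ≤ i := hi.1
  have hiN : i.toNat < N := by omega
  have hgd : PySem.List.pyGetD
      ((List.range N).map (fun k =>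
        if k < N then !(prev_queens.contains (k : Int) || innerLoop (k : Int) current_line prev_queens)
        else true)) i false
      = !(prev_queens.contains i || innerLoop i current_line prev_queens) := by
    rw [PySem.List.pyGetD_of_nonneg _ _ h0]
    rw [List.getD_eq_getElem _ _ (by simp [hiN])]
    simp [hiN, Int.toNat_of_nonneg h0]
  rw [hgd, blocked_eq]
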